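-- pv_equiv track=rewrite | github.com/b-vm/RUG_Kaggle_rent_challenge | preprocess/hash_encoder.py | find_large_enough_power_of_2
-- ===== SOURCE A (Python) =====
-- def find_large_enough_power_of_2(x):
--     powers = []
--     i = 1
--     while i <= x:
--         if i & x:
--             powers.append(i)
--         i <<= 1
--     return len(powers) + 1
-- ===== SOURCE B (Python) =====
-- def find_large_enough_power_of_2(x):
--     if x < 1:
--         return 1
--     count = 0
--     while x:
--         x &= x - 1
--         count += 1
--     return count + 1
-- ===== Notes on version B (the rewrite author's own statement) =====
-- stated objective: simpler
-- what changed: Replaces the scan over every power of 2 up to x (collecting matching powers in a list) with Brian Kernighan's loop that clears the lowest set bit per iteration and keeps only a counter.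
import Mathlib
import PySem

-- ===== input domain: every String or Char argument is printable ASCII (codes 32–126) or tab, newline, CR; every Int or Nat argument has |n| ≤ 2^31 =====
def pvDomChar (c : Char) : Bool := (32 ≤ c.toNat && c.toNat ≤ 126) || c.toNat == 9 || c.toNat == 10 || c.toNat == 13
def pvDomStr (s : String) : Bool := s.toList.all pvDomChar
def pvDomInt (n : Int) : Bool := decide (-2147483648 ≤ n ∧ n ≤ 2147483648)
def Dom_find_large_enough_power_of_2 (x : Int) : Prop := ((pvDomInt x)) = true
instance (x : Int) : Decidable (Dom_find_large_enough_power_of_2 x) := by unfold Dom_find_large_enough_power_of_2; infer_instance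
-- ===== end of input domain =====

-- B replaces A's scan over every power of 2 up to x (collecting a list) with
-- Brian Kernighan's clear-lowest-set-bit counting loop (objective: simpler).

-- ===== PORT A =====
-- while i <= x: if i & x: powers.append(i); i <<= 1
def pvLoopA (x i : Int) (powers : List Int) (hi : 1 ≤ i) : List Int :=
  if h : i ≤ x then
    pvLoopA x (i <<< (1 : Nat))
      (if PySem.Int.band i x ≠ 0 then powers ++ [i] else powers)
      (by rw [Int.shiftLeft_eq]; norm_num; omega)
  else powers
termination_by (x + 1 - i).toNat
decreasing_by
  have : i <<< (1 : Nat) = i * 2 := by rw [Int.shiftLeft_eq]; norm_num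
  rw [this]
  omega

def find_large_enough_power_of_2 (x : Int) : Int :=
  ((pvLoopA x 1 [] (by omega)).length : Int) + 1

-- ===== PORT B =====
-- while x: x &= x - 1; count += 1
def pvKern (x count : Int) (hx : 0 ≤ x) : Int :=
  if h : x = 0 then count
  else
    pvKern (PySem.Int.band x (x - 1)) (count + 1)
      (by rw [PySem.Int.band_of_nonneg hx (by omega)]; exact Int.natCast_nonneg _)
termination_by x.toNat
decreasing_by
  rw [PySem.Int.band_of_nonneg hx (by omega), Int.toNat_natCast]
  have h1 : x.toNat &&& (x - 1).toNat ≤ (x - 1).toNat := Nat.and_le_right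
  omega

def find_large_enough_power_of_2_alt (x : Int) : Int :=
  if h : x < 1 then 1
  else pvKern x 0 (by omega) + 1

-- ===== PRECONDITION & SPEC =====
def Spec_find_large_enough_power_of_2 (x : Int) (out : Int) : Prop := out = find_large_enough_power_of_2_alt x
instance (x : Int) (out : Int) : Decidable (Spec_find_large_enough_power_of_2 x out) := by unfold Spec_find_large_enough_power_of_2; infer_instance

-- ===== CLAIM (what is proved, stated in full; the proofs are below) =====
def Claim_equal_find_large_enough_power_of_2 : Prop := ∀ (x : Int), Dom_find_large_enough_power_of_2 x → Spec_find_large_enough_power_of_2 x (find_large_enough_power_of_2 x)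

-- ===== LEMMAS AND PROOFS =====

-- abbreviation used only in the proofs: popcount of a natural number
def pvF (m : Nat) : Nat := PySem.Int.bitCount (m : Int)

theorem pvF_zero : pvF 0 = 0 := PySem.Int.bitCount_zero

theorem pvF_pos (m : Nat) (hm : 0 < m) : pvF m = m % 2 + pvF (m / 2) :=
  PySem.Int.bitCount_natCast hm

theorem pvF_two_mul (a : Nat) : pvF (2 * a) = pvF a := by
  rcases Nat.eq_zero_or_pos a with h | h
  · simp [h]
  · rw [pvF_pos (2 * a) (by omega)]
    have h2 : 2 * a % 2 = 0 := by omega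
    have h3 : 2 * a / 2 = a := by omega
    rw [h2, h3, Nat.zero_add]

theorem testBit_div_mod (m k : Nat) : m.testBit k = decide (m / 2 ^ k % 2 = 1) := by
  simp only [Nat.testBit, Nat.shiftRight_eq_div_pow]
  rcases Nat.decEq (m / 2 ^ k % 2) 1 with h | h <;> simp [h]

-- clearing the lowest set bit: m & (m-1), odd case
theorem land_pred_odd (m : Nat) (h : m % 2 = 1) : m &&& (m - 1) = m - 1 := by
  apply Nat.eq_of_testBit_eq
  intro i
  cases i with
  | zero =>
    simp only [Nat.testBit_zero]
    have h0 : (m - 1) % 2 = 0 := by omega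
    simp [h0]
  | succ i =>
    rw [Nat.testBit_land]
    simp only [Nat.testBit_succ]
    have he : (m - 1) / 2 = m / 2 := by omega
    rw [he, Bool.and_self]

-- clearing the lowest set bit: m & (m-1), even case
theorem land_pred_even (m : Nat) (h0 : 0 < m) (h : m % 2 = 0) :
    m &&& (m - 1) = 2 * (m / 2 &&& (m / 2 - 1)) := by
  apply Nat.eq_of_testBit_eq
  intro i
  cases i with
  | zero =>
    simp only [Nat.testBit_zero]
    have h2 : 2 * (m / 2 &&& (m / 2 - 1)) % 2 = 0 := by omega
    simp [h, h2]
  | succ i =>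
    rw [Nat.testBit_land]
    simp only [Nat.testBit_succ]
    have he : (m - 1) / 2 = m / 2 - 1 := by omega
    have hr : 2 * (m / 2 &&& (m / 2 - 1)) / 2 = m / 2 &&& (m / 2 - 1) := by omega
    rw [he, hr, Nat.testBit_land]

-- Kernighan's step removes exactly one set bit
theorem pvF_land_pred (m : Nat) (hm : 0 < m) : pvF (m &&& (m - 1)) + 1 = pvF m := by
  induction m using Nat.strong_induction_on with
  | _ m ih =>
    rcases Nat.even_or_odd m with he | ho
    · -- m even
      have h2 : m % 2 = 0 := Nat.even_iff.mp he
      have hm2 : 0 < m / 2 := by omega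
      have ihh := ih (m / 2) (Nat.div_lt_self hm (by omega)) hm2
      rw [land_pred_even m hm h2, pvF_two_mul, ihh, pvF_pos m hm, h2, Nat.zero_add]
    · -- m odd
      have h1 : m % 2 = 1 := Nat.odd_iff.mp ho
      have hm1 : m - 1 = 2 * (m / 2) := by omega
      rw [land_pred_odd m h1, hm1, pvF_two_mul, pvF_pos m hm, h1]
      omega

-- B's loop computes count + popcount
theorem pvKern_spec (n : Nat) : ∀ (x c : Int) (hx : 0 ≤ x), x.toNat = n →
    pvKern x c hx = c + (pvF x.toNat : Int) := by
  induction n using Nat.strong_induction_on with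
  | _ n ih =>
    intro x c hx hn
    rw [pvKern]
    split
    · next h => subst h; simp [pvF_zero]
    · next h =>
      have hpos : 0 < x := lt_of_le_of_ne hx (Ne.symm h)
      have hb : PySem.Int.band x (x - 1) = ((x.toNat &&& (x - 1).toNat : Nat) : Int) :=
        PySem.Int.band_of_nonneg hx (by omega)
      have hlt : (PySem.Int.band x (x - 1)).toNat < n := by
        rw [hb, Int.toNat_natCast]
        have := Nat.and_le_right (n := x.toNat) (m := (x - 1).toNat)
        omega
      rw [ih _ hlt _ _ _ rfl]
      have hm : 0 < x.toNat := by omega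
      have h1 : (x - 1).toNat = x.toNat - 1 := by omega
      rw [hb, Int.toNat_natCast, h1]
      have := pvF_land_pred x.toNat hm
      omega

-- A's loop, started at i = 2^k, counts the set bits of x from position k up
theorem pvLoopA_spec (n : Nat) : ∀ (k : Nat) (x i : Int) (acc : List Int)
    (hi : 1 ≤ i), i = ((2 ^ k : Nat) : Int) → 0 ≤ x → x.toNat >>> k = n →
    (pvLoopA x i acc hi).length = acc.length + pvF n := by
  induction n using Nat.strong_induction_on with
  | _ n ih =>
    intro k x i acc hi hik hx hn
    rw [show ∀ x i powers hi, pvLoopA x i powers hi = if h : i ≤ x then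
        pvLoopA x (i <<< (1 : Nat))
          (if PySem.Int.band i x ≠ 0 then powers ++ [i] else powers)
          (by rw [Int.shiftLeft_eq]; norm_num; omega)
      else powers from fun x i powers hi => by rw [pvLoopA]]
    subst hik
    split
    · next h =>
      -- 2^k ≤ x : the loop body runs
      have hsh : (((2 ^ k : Nat) : Int)) <<< (1 : Nat) = ((2 ^ (k + 1) : Nat) : Int) := by
        rw [Int.shiftLeft_eq]; push_cast; ring
      have hle : (2 ^ k : Nat) ≤ x.toNat := by omega
      have hnpos : 0 < n := by
        rw [← hn, Nat.shiftRight_eq_div_pow]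
        exact Nat.div_pos hle (Nat.two_pow_pos k)
      have hn' : x.toNat >>> (k + 1) = n / 2 := by
        rw [Nat.shiftRight_eq_div_pow] at hn ⊢
        rw [pow_succ, ← Nat.div_div_eq_div_mul, hn]
      have hband : PySem.Int.band ((2 ^ k : Nat) : Int) x = ((2 ^ k &&& x.toNat : Nat) : Int) := by
        rw [PySem.Int.band_of_nonneg (by positivity) hx, Int.toNat_natCast]
      have hbit : (2 ^ k &&& x.toNat) = (x.toNat.testBit k).toNat * 2 ^ k := by
        rw [Nat.land_comm, Nat.and_two_pow]
      have htb : x.toNat.testBit k = decide (n % 2 = 1) := by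
        rw [testBit_div_mod, ← Nat.shiftRight_eq_div_pow, hn]
      by_cases hb : n % 2 = 1
      · have hne : PySem.Int.band ((2 ^ k : Nat) : Int) x ≠ 0 := by
          rw [hband, hbit, htb]
          simp [hb]
        rw [if_pos hne,
            ih (n / 2) (by omega) (k + 1) x _ (acc ++ [((2 ^ k : Nat) : Int)]) _ hsh hx hn',
            List.length_append, List.length_cons, List.length_nil, pvF_pos n hnpos, hb]
        omega
      · have heq : PySem.Int.band ((2 ^ k : Nat) : Int) x = 0 := by
          rw [hband, hbit, htb]
          simp [hb]
        rw [if_neg (not_ne_iff.mpr heq),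
            ih (n / 2) (by omega) (k + 1) x _ acc _ hsh hx hn',
            pvF_pos n hnpos]
        omega
    · next h =>
      -- 2^k > x : the loop is finished, no bits remain
      have hlt : x.toNat < 2 ^ k := by omega
      have hz : n = 0 := by
        rw [← hn, Nat.shiftRight_eq_div_pow]
        exact Nat.div_eq_of_lt hlt
      rw [hz, pvF_zero]
      omega

-- ===== VERDICT (by name: the statement is the Claim_ definition above) =====
theorem find_large_enough_power_of_2_spec : Claim_equal_find_large_enough_power_of_2 := by
  unfold Claim_equal_find_large_enough_power_of_2 Spec_find_large_enough_power_of_2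
  intro x _
  unfold find_large_enough_power_of_2 find_large_enough_power_of_2_alt
  by_cases hx : x < 1
  · rw [dif_pos hx, pvLoopA.eq_def, dif_neg (by omega), List.length_nil]
    norm_num
  · rw [dif_neg hx]
    have hx0 : 0 ≤ x := by omega
    have hA := pvLoopA_spec (x.toNat >>> 0) 0 x 1 [] (by norm_num) (by norm_num) hx0 rfl
    have hB := pvKern_spec x.toNat x 0 hx0 rfl
    simp only [Nat.shiftRight_zero] at hA
    rw [hA, hB, List.length_nil]
    push_cast
    omega
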